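-- pv_equiv track=rewrite | github.com/sramekm/WPAtester | pteapinspector/pteapinspector/pteapinspector.py | detect_enterprise
-- ===== SOURCE A (Python) =====
-- def detect_enterprise(akm_list):
--     # Determine if a network is WPA2-Enterprise or WPA3-Enterprise
--     wpa2 = {1, 3, 5}
--     wpa3 = {8, 9}
--     if any(a in wpa3 for a in akm_list):
--         return 'WPA3-Enterprise'
--     if any(a in wpa2 for a in akm_list):
--         return 'WPA2-Enterprise'
--     return 'Unknown EAP version or PSK authentication used'
-- ===== SOURCE B (Python) =====
-- def detect_enterprise(akm_list):
--     # Determine if a network is WPA2-Enterprise or WPA3-Enterprise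
--     # Rank-based: map each AKM suite to a severity rank, take the maximum
--     # over the list, and look the answer up in a label table.
--     def rank(a):
--         if a in (8, 9):
--             return 2
--         if a in (1, 3, 5):
--             return 1
--         return 0
--     labels = ['Unknown EAP version or PSK authentication used',
--               'WPA2-Enterprise', 'WPA3-Enterprise']
--     best = 0
--     for a in akm_list:
--         best = max(best, rank(a))
--     return labels[best]
-- ===== Notes on version B (the rewrite author's own statement) =====
-- stated objective: alternative
-- what changed: Replaced the two priority-ordered set-membership any() scans with a rank function mapping each AKM suite to a severity level (2/1/0), a single fold taking the maximum rank, and a lookup into a label table indexed by that maximum.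
import Mathlib
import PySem

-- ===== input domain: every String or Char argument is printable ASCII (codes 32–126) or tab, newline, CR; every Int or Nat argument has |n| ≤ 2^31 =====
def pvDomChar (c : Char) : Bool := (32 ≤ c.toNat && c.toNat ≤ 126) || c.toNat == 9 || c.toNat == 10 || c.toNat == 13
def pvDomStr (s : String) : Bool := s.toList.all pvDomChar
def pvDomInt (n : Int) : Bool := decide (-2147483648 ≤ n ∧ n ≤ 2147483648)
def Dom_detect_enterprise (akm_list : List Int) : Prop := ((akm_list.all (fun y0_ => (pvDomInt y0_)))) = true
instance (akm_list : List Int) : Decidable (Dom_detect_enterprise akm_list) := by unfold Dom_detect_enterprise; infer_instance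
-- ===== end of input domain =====

-- B re-implements A's two prioritized set-membership scans as a single max-of-ranks fold
-- with a label table (objective: alternative decomposition; same O(n) cost).

-- ===== PORT A =====
-- WPA2/WPA3 AKM-suite sets as Python set literals
def wpa2Set : PySem.Set Int := PySem.Set.ofList [1, 3, 5]
def wpa3Set : PySem.Set Int := PySem.Set.ofList [8, 9]

def detect_enterprise (akm_list : List Int) : String :=
  if akm_list.any (fun a => PySem.Set.contains wpa3Set a) then
    "WPA3-Enterprise"
  else if akm_list.any (fun a => PySem.Set.contains wpa2Set a) then
    "WPA2-Enterprise"
  else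
    "Unknown EAP version or PSK authentication used"

-- ===== PORT B =====
-- severity rank of one AKM suite: tuple-membership tests, as in Source B
def rankAkm (a : Int) : Nat :=
  if a = 8 ∨ a = 9 then 2
  else if a = 1 ∨ a = 3 ∨ a = 5 then 1
  else 0

def enterpriseLabels : List String :=
  ["Unknown EAP version or PSK authentication used",
   "WPA2-Enterprise", "WPA3-Enterprise"]

-- fold taking the maximum rank, then table lookup (best is always in range 0..2,
-- so the Python indexing labels[best] never raises; .getD "" is exact here)
def detect_enterprise_alt (akm_list : List Int) : String :=
  let best := akm_list.foldl (fun best a => max best (rankAkm a)) 0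
  (PySem.List.pyGet? enterpriseLabels (Int.ofNat best)).getD ""

-- ===== PRECONDITION & SPEC =====
def Spec_detect_enterprise (akm_list : List Int) (out : String) : Prop := out = detect_enterprise_alt akm_list
instance (akm_list : List Int) (out : String) : Decidable (Spec_detect_enterprise akm_list out) := by unfold Spec_detect_enterprise; infer_instance

-- ===== CLAIM (what is proved, stated in full; the proofs are below) =====
def Claim_equal_detect_enterprise : Prop := ∀ (akm_list : List Int), Dom_detect_enterprise akm_list → Spec_detect_enterprise akm_list (detect_enterprise akm_list)

-- ===== LEMMAS AND PROOFS =====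

-- the pure value of the max-of-ranks fold, expressed via A's two any-scans
def pureMax (akm_list : List Int) : Nat :=
  if akm_list.any (fun a => PySem.Set.contains wpa3Set a) then 2
  else if akm_list.any (fun a => PySem.Set.contains wpa2Set a) then 1
  else 0

lemma rank_cases (a : Int) :
    rankAkm a = (if PySem.Set.contains wpa3Set a then 2
                 else if PySem.Set.contains wpa2Set a then 1 else 0) := by
  simp only [rankAkm, wpa2Set, wpa3Set, PySem.Set.contains, PySem.Set.ofList,
    PySem.Set.empty]
  split_ifs <;> simp_all

lemma foldl_max_eq (akm_list : List Int) (m : Nat) :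
    akm_list.foldl (fun best a => max best (rankAkm a)) m
      = max m (pureMax akm_list) := by
  induction akm_list generalizing m with
  | nil => simp [pureMax]
  | cons x xs ih =>
    rw [List.foldl_cons, ih, rank_cases]
    by_cases h3 : x ∈ wpa3Set <;>
    by_cases h2 : x ∈ wpa2Set <;>
    by_cases a3 : ∃ y ∈ xs, y ∈ wpa3Set <;>
    by_cases a2 : ∃ y ∈ xs, y ∈ wpa2Set <;>
    simp [pureMax, List.any_cons, h3, h2, a3, a2]

-- ===== VERDICT (by name: the statement is the Claim_ definition above) =====
theorem detect_enterprise_spec : Claim_equal_detect_enterprise := by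
  intro akm_list _
  unfold Spec_detect_enterprise detect_enterprise detect_enterprise_alt
  simp only [foldl_max_eq, Nat.zero_max, pureMax]
  split_ifs <;> simp [PySem.List.pyGet?, PySem.List.pyIdx?, enterpriseLabels]
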